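-- pv_equiv track=rewrite | github.com/SynapticaDeSci/synaptica-web | shared/research_runs/service.py | _collect_phase2_marker_hits
-- ===== SOURCE A (Python) =====
-- from typing import Any, Dict, List, Optional
--
-- _PHASE2_CONTRADICTION_MARKERS = (
--     "conflict",
--     "contradict",
--     "mixed",
--     "disputed",
--     "counterpoint",
--     "uncertain",
-- )
--
-- def _collect_phase2_marker_hits(values: List[Any]) -> List[str]:
--     hits = set()
--     for value in values:
--         if value is None:
--             continue
--         normalized = str(value).strip().lower()
--         if not normalized:
--             continue
--         for marker in _PHASE2_CONTRADICTION_MARKERS: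
--             if marker in normalized:
--                 hits.add(marker)
--     return sorted(hits)
-- ===== SOURCE B (Python) =====
-- _PHASE2_CONTRADICTION_MARKERS = (
--     "conflict",
--     "contradict",
--     "mixed",
--     "disputed",
--     "counterpoint",
--     "uncertain",
-- )
--
-- def _collect_phase2_marker_hits(values):
--     # Join all normalized values into one newline-separated haystack; since no
--     # marker contains a newline, a marker occurs in the haystack iff it occurs
--     # in some individual value, so each marker needs only ONE substring search.
--     haystack = "\n".join(str(v).strip().lower() for v in values if v is not None)
--     return sorted(m for m in _PHASE2_CONTRADICTION_MARKERS if m in haystack)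
-- ===== Notes on version B (the rewrite author's own statement) =====
-- stated objective: alternative
-- what changed: B concatenates all normalized values into one newline-separated haystack string and performs a single substring search per marker over that haystack (correct because no marker contains a newline), instead of A's per-value inner marker loop accumulating into a set.
import Mathlib
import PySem

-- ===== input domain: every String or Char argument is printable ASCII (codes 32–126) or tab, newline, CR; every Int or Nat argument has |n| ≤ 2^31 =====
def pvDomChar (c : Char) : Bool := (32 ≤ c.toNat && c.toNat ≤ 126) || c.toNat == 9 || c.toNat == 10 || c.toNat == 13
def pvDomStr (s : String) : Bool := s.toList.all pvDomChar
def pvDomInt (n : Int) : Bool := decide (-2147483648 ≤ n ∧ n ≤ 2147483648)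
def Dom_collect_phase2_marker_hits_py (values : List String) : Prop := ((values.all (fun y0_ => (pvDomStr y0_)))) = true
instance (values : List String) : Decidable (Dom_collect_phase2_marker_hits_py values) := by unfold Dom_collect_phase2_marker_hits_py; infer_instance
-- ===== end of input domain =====

-- B joins all normalized values into one newline-separated haystack and does a single
-- substring search per marker over it (no marker contains a newline), instead of A's
-- per-value inner marker loop accumulating into a set (objective: alternative).

def pvMarkers : List String :=
  ["conflict", "contradict", "mixed", "disputed", "counterpoint", "uncertain"]

-- ===== PORT A =====
-- the inner 'for marker in _PHASE2_CONTRADICTION_MARKERS' body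
def pvInnerStep (normalized : String) (hits : PySem.Set String) (marker : String) : PySem.Set String :=
  if PySem.Str.isIn marker normalized then PySem.Set.add hits marker else hits

-- the outer 'for value in values' body (values are strings here, so the None skip
-- and str(value) vanish: str(value) = value)
def pvOuterStep (hits : PySem.Set String) (value : String) : PySem.Set String :=
  if PySem.Str.lower (PySem.Str.strip value) = "" then hits
  else pvMarkers.foldl (pvInnerStep (PySem.Str.lower (PySem.Str.strip value))) hits

def collect_phase2_marker_hits_py (values : List String) : List String :=
  PySem.List.sorted (values.foldl pvOuterStep PySem.Set.empty) (fun x => x) false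

-- ===== PORT B =====
def collect_phase2_marker_hits_py_alt (values : List String) : List String :=
  let haystack :=
    PySem.Str.join "\n" (values.map (fun v => PySem.Str.lower (PySem.Str.strip v)))
  PySem.List.sorted
    (pvMarkers.filter (fun m => PySem.Str.isIn m haystack)) (fun x => x) false

-- ===== PRECONDITION & SPEC =====
def Spec_collect_phase2_marker_hits_py (values : List String) (out : List String) : Prop := out = collect_phase2_marker_hits_py_alt values
instance (values : List String) (out : List String) : Decidable (Spec_collect_phase2_marker_hits_py values out) := by unfold Spec_collect_phase2_marker_hits_py; infer_instance

-- ===== CLAIM (what is proved, stated in full; the proofs are below) =====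
def Claim_equal_collect_phase2_marker_hits_py : Prop := ∀ (values : List String), Dom_collect_phase2_marker_hits_py values → Spec_collect_phase2_marker_hits_py values (collect_phase2_marker_hits_py values)

-- ===== LEMMAS AND PROOFS =====

-- membership in the inner marker loop's accumulated set
lemma pv_inner_mem (markers : List String) (n : String) (acc : PySem.Set String) (x : String) :
    x ∈ markers.foldl (pvInnerStep n) acc ↔
      x ∈ acc ∨ (x ∈ markers ∧ PySem.Str.isIn x n = true) := by
  induction markers generalizing acc with
  | nil => simp
  | cons m ms ih =>
    rw [List.foldl_cons, ih]
    unfold pvInnerStep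
    by_cases hm : PySem.Str.isIn m n = true
    · rw [if_pos hm, PySem.Set.mem_add]
      simp only [List.mem_cons]
      constructor
      · rintro ((h | rfl) | ⟨h, hx⟩) <;> tauto
      · rintro (h | ⟨(rfl | h), hx⟩) <;> tauto
    · rw [if_neg hm]
      simp only [List.mem_cons]
      constructor
      · rintro (h | ⟨h, hx⟩) <;> tauto
      · rintro (h | ⟨(rfl | h), hx⟩) <;> tauto

lemma pv_inner_nodup (markers : List String) (n : String) (acc : PySem.Set String)
    (h : acc.Nodup) : (markers.foldl (pvInnerStep n) acc).Nodup := by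
  induction markers generalizing acc with
  | nil => exact h
  | cons m ms ih =>
    rw [List.foldl_cons]
    apply ih
    unfold pvInnerStep
    split_ifs
    · exact PySem.Set.nodup_add _ _ h
    · exact h

-- membership in A's accumulated set over the values
lemma pv_outer_mem (vals : List String) (acc : PySem.Set String) (x : String) :
    x ∈ vals.foldl pvOuterStep acc ↔
      x ∈ acc ∨ ∃ v ∈ vals, PySem.Str.lower (PySem.Str.strip v) ≠ "" ∧
        x ∈ pvMarkers ∧ PySem.Str.isIn x (PySem.Str.lower (PySem.Str.strip v)) = true := by
  induction vals generalizing acc with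
  | nil => simp
  | cons v vs ih =>
    rw [List.foldl_cons, ih]
    simp only [pvOuterStep]
    by_cases hv : PySem.Str.lower (PySem.Str.strip v) = ""
    · rw [if_pos hv]
      simp only [List.mem_cons]
      constructor
      · rintro (h | ⟨w, hw, hs⟩)
        · exact Or.inl h
        · exact Or.inr ⟨w, Or.inr hw, hs⟩
      · rintro (h | ⟨w, (rfl | hw), hne, hs⟩)
        · exact Or.inl h
        · exact absurd hv hne
        · exact Or.inr ⟨w, hw, hne, hs⟩
    · rw [if_neg hv, pv_inner_mem]
      simp only [List.mem_cons]
      constructor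
      · rintro ((h | ⟨hm, hi⟩) | ⟨w, hw, hs⟩)
        · exact Or.inl h
        · exact Or.inr ⟨v, Or.inl rfl, hv, hm, hi⟩
        · exact Or.inr ⟨w, Or.inr hw, hs⟩
      · rintro (h | ⟨w, (rfl | hw), hne, hm, hi⟩)
        · exact Or.inl (Or.inl h)
        · exact Or.inl (Or.inr ⟨hm, hi⟩)
        · exact Or.inr ⟨w, hw, hne, hm, hi⟩

lemma pv_outer_nodup (vals : List String) (acc : PySem.Set String) (h : acc.Nodup) :
    (vals.foldl pvOuterStep acc).Nodup := by
  induction vals generalizing acc with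
  | nil => exact h
  | cons v vs ih =>
    rw [List.foldl_cons]
    apply ih
    unfold pvOuterStep
    split_ifs
    · exact h
    · exact pv_inner_nodup _ _ _ h

-- a substring containing no separator character lies entirely inside one side
lemma pv_infix_sep (m a b : List Char) (c : Char) (hc : c ∉ m) :
    m <:+: a ++ c :: b ↔ m <:+: a ∨ m <:+: b := by
  constructor
  · intro h
    obtain ⟨j, hp⟩ := (PySem.Chars.exists_prefix_drop_iff_isIn m (a ++ c :: b)).mpr
      ((PySem.Chars.isIn_iff_infix m _).mpr h)
    rcases Nat.lt_or_ge j (a.length + 1) with hj | hj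
    · have hja : j ≤ a.length := by omega
      rw [List.drop_append_of_le_length hja] at hp
      rcases Nat.lt_or_ge (a.drop j).length m.length with hml | hml
      · exfalso
        obtain ⟨t, ht⟩ := hp
        have h1 : (m ++ t)[(a.drop j).length]? = m[(a.drop j).length]? :=
          List.getElem?_append_left hml
        have h2 : (a.drop j ++ c :: b)[(a.drop j).length]? = some c := by
          rw [List.getElem?_append_right (le_refl _)]
          simp
        rw [ht, h2] at h1
        exact hc (List.mem_of_getElem? h1.symm)
      · left
        have hma : m <+: a.drop j :=
          List.prefix_of_prefix_length_le hp (List.prefix_append _ _) hml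
        exact hma.isInfix.trans (List.drop_suffix j a).isInfix
    · right
      have hsplit : a ++ c :: b = (a ++ [c]) ++ b := by simp
      have hlen : (a ++ [c]).length = a.length + 1 := by simp
      have hdrop : (a ++ c :: b).drop j = b.drop (j - (a.length + 1)) := by
        rw [hsplit]
        have hj' : j = (a ++ [c]).length + (j - (a.length + 1)) := by rw [hlen]; omega
        rw [hj', List.drop_append]
        rw [List.drop_eq_nil_of_le (by omega)]
        simp [hlen]
      rw [hdrop] at hp
      exact hp.isInfix.trans (List.drop_suffix _ b).isInfix
  · rintro (h | h)
    · exact h.trans (List.prefix_append a (c :: b)).isInfix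
    · exact h.trans ((List.suffix_cons c b).trans (List.suffix_append a (c :: b))).isInfix

-- marker occurs in the newline-joined haystack iff it occurs in some piece
lemma pv_isIn_join (m : List Char) (hm : m ≠ []) (hc : '\n' ∉ m) (ps : List (List Char)) :
    PySem.Chars.isIn m (PySem.Chars.join ['\n'] ps) = true ↔
      ∃ p ∈ ps, PySem.Chars.isIn m p = true := by
  induction ps with
  | nil =>
    simp [PySem.Chars.join_nil, PySem.Chars.isIn_iff_infix, List.infix_nil, hm]
  | cons p rest ih =>
    cases rest with
    | nil => simp [PySem.Chars.join_singleton]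
    | cons q rs =>
      rw [PySem.Chars.join_cons_cons]
      have : p ++ ['\n'] ++ PySem.Chars.join ['\n'] (q :: rs)
          = p ++ '\n' :: PySem.Chars.join ['\n'] (q :: rs) := by simp
      rw [this, PySem.Chars.isIn_iff_infix, pv_infix_sep m _ _ '\n' hc,
        ← PySem.Chars.isIn_iff_infix, ← PySem.Chars.isIn_iff_infix, ih]
      simp only [List.mem_cons]
      constructor
      · rintro (h | ⟨w, hw, hs⟩)
        · exact ⟨p, Or.inl rfl, h⟩
        · exact ⟨w, Or.inr hw, hs⟩
      · rintro ⟨w, (rfl | hw), hs⟩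
        · exact Or.inl hs
        · exact Or.inr ⟨w, hw, hs⟩

-- ===== VERDICT (by name: the statement is the Claim_ definition above) =====
theorem collect_phase2_marker_hits_py_spec : Claim_equal_collect_phase2_marker_hits_py := by
  intro values _
  unfold Spec_collect_phase2_marker_hits_py
  simp only [collect_phase2_marker_hits_py, collect_phase2_marker_hits_py_alt]
  rw [PySem.List.sorted_id_eq_sorted_id_iff_perm]
  have hA := pv_outer_nodup values PySem.Set.empty List.nodup_nil
  have hB : (pvMarkers.filter (fun m => PySem.Str.isIn m
      (PySem.Str.join "\n" (values.map (fun v => PySem.Str.lower (PySem.Str.strip v)))))).Nodup :=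
    List.Nodup.filter _ (by decide)
  rw [List.perm_ext_iff_of_nodup hA hB]
  intro x
  rw [pv_outer_mem]
  have hmark : ∀ y ∈ pvMarkers, y.toList ≠ [] ∧ '\n' ∉ y.toList := by decide
  simp only [PySem.Set.empty, List.not_mem_nil, false_or, List.mem_filter,
    PySem.Str.isIn_eq, PySem.Str.toList_join, List.map_map,
    show ("\n".toList) = ['\n'] from rfl]
  constructor
  · rintro ⟨v, hv, hne, hm, hi⟩
    obtain ⟨hnil, hnl⟩ := hmark x hm
    refine ⟨hm, ?_⟩
    rw [pv_isIn_join _ hnil hnl]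
    exact ⟨_, List.mem_map_of_mem hv, by simpa using hi⟩
  · rintro ⟨hm, hi⟩
    obtain ⟨hnil, hnl⟩ := hmark x hm
    rw [pv_isIn_join _ hnil hnl] at hi
    obtain ⟨p, hp, hip⟩ := hi
    simp only [List.mem_map, Function.comp] at hp
    obtain ⟨v, hv, rfl⟩ := hp
    refine ⟨v, hv, ?_, hm, by simpa using hip⟩
    intro h0
    rw [h0] at hip
    rw [PySem.Chars.isIn_iff_infix] at hip
    simp at hip
    exact hnil (by simpa using hip)
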